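-- pv_equiv track=rewrite | github.com/Phoenixcoder-6/DSA_Essentials | Array/largest subarray consecutive integers.py | consecutive_subarray
-- ===== SOURCE A (Python) =====
-- def consecutive_subarray(arr):
--     n= len(arr)
--     max_length=0
--     start_index=0
--     for i in range(n):
--         seen=set()
--         min_val= arr[i]
--         max_val= arr[i]
--
--         for j in range(i,n):
--             if arr[j] in seen:
--                 break
--
--             seen.add(arr[j])
--             min_val= min(min_val,arr[j])
--             max_val= max(max_val,arr[j])
--
--             if max_val- min_val == j-i:
--                 if (j-i+1)> max_length:
--                     max_length= j-i+1
--                     start_index= i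
--
--
--     return arr[start_index:start_index+ max_length]
-- ===== SOURCE B (Python) =====
-- def consecutive_subarray(arr):
--     n = len(arr)
--     max_length = 0
--     start_index = 0
--     for i in range(n):
--         for j in range(i, n):
--             w = arr[i:j + 1]
--             if len(set(w)) == len(w) and max(w) - min(w) == len(w) - 1 and len(w) > max_length:
--                 max_length = len(w)
--                 start_index = i
--     return arr[start_index:start_index + max_length]
-- ===== Notes on version B (the rewrite author's own statement) =====
-- stated objective: simpler
-- what changed: Replaces A's incremental inner loop (threaded seen-set, running min/max, early break) with a stateless brute force that checks each subarray arr[i:j+1] independently via len(set(w))==len(w) and max(w)-min(w)==len(w)-1.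
import Mathlib
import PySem

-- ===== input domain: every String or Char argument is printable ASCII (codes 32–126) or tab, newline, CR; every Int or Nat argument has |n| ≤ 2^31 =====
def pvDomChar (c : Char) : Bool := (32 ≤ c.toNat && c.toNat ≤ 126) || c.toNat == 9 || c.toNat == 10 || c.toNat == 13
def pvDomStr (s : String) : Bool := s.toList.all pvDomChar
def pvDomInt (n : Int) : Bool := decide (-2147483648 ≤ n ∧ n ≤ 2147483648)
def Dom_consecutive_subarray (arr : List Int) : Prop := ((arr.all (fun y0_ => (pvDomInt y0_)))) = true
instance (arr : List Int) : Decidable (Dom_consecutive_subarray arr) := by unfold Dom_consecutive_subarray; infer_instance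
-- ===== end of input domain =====

-- B replaces A's stateful inner loop (seen-set, running min/max, early break) by an
-- independent check of every subarray; objective: simpler (not faster).

-- ===== PORT A =====
-- inner loop 'for j in range(i, n): …' with its break, threading seen/min/max and the
-- (max_length, start_index) accumulator; arr.getD j 0 is arr[j] (j is always in range here)
def innerA (arr : List Int) (n i : Nat) (acc : Int × Int) (seen : PySem.Set Int)
    (mn mx : Int) (j : Nat) : Int × Int :=
  if _h : j < n then
    let x := arr.getD j 0
    if PySem.Set.contains seen x then acc
    else
      let seen' := PySem.Set.add seen x
      let mn' := min mn x
      let mx' := max mx x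
      let acc' :=
        if mx' - mn' = (j : Int) - (i : Int) then
          if (j : Int) - (i : Int) + 1 > acc.1 then ((j : Int) - (i : Int) + 1, (i : Int)) else acc
        else acc
      innerA arr n i acc' seen' mn' mx' (j + 1)
  else acc
termination_by n - j

def consecutive_subarray (arr : List Int) : List Int :=
  let n := arr.length
  let res := (List.range n).foldl
    (fun acc i => innerA arr n i acc PySem.Set.empty (arr.getD i 0) (arr.getD i 0) i) (0, 0)
  PySem.List.slice arr (some res.2) (some (res.2 + res.1))

-- ===== PORT B =====
-- inner loop 'for j in range(i, n): w = arr[i:j+1]; if …'; w is nonempty in every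
-- reached call (i ≤ j), so rendering Python's max(w)/min(w) as (max?/min? w).getD 0 is exact
def innerB (arr : List Int) (n i : Nat) (acc : Int × Int) (j : Nat) : Int × Int :=
  if _h : j < n then
    let w := PySem.List.slice arr (some (i : Int)) (some ((j : Int) + 1))
    let acc' :=
      if (PySem.Set.ofList w).length = w.length ∧
         (PySem.List.max? w (fun y => y)).getD 0 - (PySem.List.min? w (fun y => y)).getD 0
           = (w.length : Int) - 1 ∧
         (w.length : Int) > acc.1
      then ((w.length : Int), (i : Int)) else acc
    innerB arr n i acc' (j + 1)
  else acc
termination_by n - j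

def consecutive_subarray_alt (arr : List Int) : List Int :=
  let n := arr.length
  let res := (List.range n).foldl (fun acc i => innerB arr n i acc i) (0, 0)
  PySem.List.slice arr (some res.2) (some (res.2 + res.1))

-- ===== PRECONDITION & SPEC =====
def Spec_consecutive_subarray (arr : List Int) (out : List Int) : Prop := out = consecutive_subarray_alt arr
instance (arr : List Int) (out : List Int) : Decidable (Spec_consecutive_subarray arr out) := by unfold Spec_consecutive_subarray; infer_instance

-- ===== CLAIM (what is proved, stated in full; the proofs are below) =====
def Claim_equal_consecutive_subarray : Prop := ∀ (arr : List Int), Dom_consecutive_subarray arr → Spec_consecutive_subarray arr (consecutive_subarray arr)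

-- ===== LEMMAS AND PROOFS =====

-- the window arr[i:j] as a plain drop/take
def win (arr : List Int) (i j : Nat) : List Int := (arr.drop i).take (j - i)

lemma ofList_sublist (xs : List Int) : (PySem.Set.ofList xs).Sublist xs := by
  induction xs using List.reverseRecOn with
  | nil => simp [PySem.Set.ofList]
  | append_singleton xs x ih =>
    rw [PySem.Set.ofList_append_singleton, PySem.Set.add]
    split
    · exact ih.trans (List.sublist_append_left _ _)
    · exact List.Sublist.append ih (List.Sublist.refl _)

lemma ofList_length_eq_iff (xs : List Int) :
    (PySem.Set.ofList xs).length = xs.length ↔ xs.Nodup := by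
  constructor
  · intro h
    have he := (List.Sublist.length_eq (ofList_sublist xs)).mp h
    rw [← he]; exact PySem.Set.nodup_ofList xs
  · intro h; rw [PySem.Set.ofList_eq_self_of_nodup _ h]

lemma win_succ (arr : List Int) (i j : Nat) (hij : i ≤ j) (hj : j < arr.length) :
    win arr i (j + 1) = win arr i j ++ [arr.getD j 0] := by
  unfold win
  have h1 : j + 1 - i = (j - i) + 1 := by omega
  have h2 : j - i < (arr.drop i).length := by simp; omega
  rw [h1, List.take_succ_eq_append_getElem h2]
  have h3 : (arr.drop i)[j - i]'h2 = arr.getD j 0 := by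
    rw [List.getElem_drop, List.getD_eq_getElem arr 0 hj]
    congr 1; omega
  rw [h3]

lemma win_mono (arr : List Int) (i j j' : Nat) (h : j ≤ j') :
    (win arr i j).Sublist (win arr i j') := by
  exact List.take_sublist_take_left (by omega)

lemma win_head (arr : List Int) (i j : Nat) (hij : i ≤ j) (hi : i < arr.length) :
    win arr i (j + 1) = arr[i] :: (arr.drop (i + 1)).take (j - i) := by
  unfold win
  rw [List.drop_eq_getElem_cons hi]
  have h1 : j + 1 - i = (j - i) + 1 := by omega
  rw [h1, List.take_succ_cons]


lemma slice_eq_win (arr : List Int) (i j : Nat) :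
    PySem.List.slice arr (some (i : Int)) (some ((j : Int) + 1)) = win arr i (j + 1) := by
  have h : ((j : Int) + 1) = ((j + 1 : Nat) : Int) := by push_cast; ring
  rw [h, PySem.List.slice_natCast]; rfl

lemma innerB_stuck (arr : List Int) (i : Nat) :
    ∀ (k j : Nat) (acc : Int × Int), k = arr.length - j →
    (∀ j', j ≤ j' → ¬ (win arr i (j' + 1)).Nodup) →
    innerB arr arr.length i acc j = acc := by
  intro k
  induction k with
  | zero =>
    intro j acc hk hnd
    unfold innerB
    rw [dif_neg (by omega)]
  | succ k ih =>
    intro j acc hk hnd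
    unfold innerB
    by_cases hj : j < arr.length
    · rw [dif_pos hj]
      simp only [slice_eq_win]
      rw [if_neg (by
        intro ⟨h1, _, _⟩
        exact hnd j le_rfl ((ofList_length_eq_iff _).mp h1))]
      exact ih (j + 1) acc (by omega) (fun j' h => hnd j' (by omega))
    · rw [dif_neg hj]


lemma inner_eq (arr : List Int) (i : Nat) :
    ∀ (k j : Nat) (acc : Int × Int), k = arr.length - j → i ≤ j →
    (win arr i j).Nodup →
    innerA arr arr.length i acc (PySem.Set.ofList (win arr i j))
      ((win arr i j).foldl min (arr.getD i 0))
      ((win arr i j).foldl max (arr.getD i 0)) j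
    = innerB arr arr.length i acc j := by
  intro k
  induction k with
  | zero =>
    intro j acc hk hij hnd
    unfold innerA innerB
    rw [dif_neg (by omega), dif_neg (by omega)]
  | succ k ih =>
    intro j acc hk hij hnd
    have hj : j < arr.length := by omega
    have hi : i < arr.length := lt_of_le_of_lt hij hj
    have hgd : arr.getD j 0 = arr[j] := List.getD_eq_getElem arr 0 hj
    have hgi : arr.getD i 0 = arr[i] := List.getD_eq_getElem arr 0 hi
    unfold innerA innerB
    rw [dif_pos hj, dif_pos hj]
    simp only [slice_eq_win]
    by_cases hmem : arr.getD j 0 ∈ win arr i j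
    · -- A breaks here; B never records again from this j on
      rw [if_pos ((PySem.Set.contains_iff _ _).mpr ((PySem.Set.mem_ofList _ _).mpr hmem))]
      have hnd1 : ¬ (win arr i (j + 1)).Nodup := by
        rw [win_succ arr i j hij hj]
        intro hc
        rcases List.nodup_append.mp hc with ⟨-, -, hdisj⟩
        exact hdisj _ hmem _ (List.mem_singleton_self _) rfl
      have hstuck : ∀ j', j ≤ j' → ¬ (win arr i (j' + 1)).Nodup := by
        intro j' hjj' hc
        exact hnd1 (hc.sublist (win_mono arr i (j + 1) (j' + 1) (by omega)))
      -- fold B's remaining loop away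
      have hB : innerB arr arr.length i acc (j + 1) = acc :=
        innerB_stuck arr i (arr.length - (j + 1)) (j + 1) acc rfl
          (fun j' h => hstuck j' (by omega))
      rw [if_neg (by
        intro ⟨h1, _, _⟩
        exact hstuck j le_rfl ((ofList_length_eq_iff _).mp h1))]
      exact hB.symm
    · -- fresh element: both sides record iff the window is consecutive
      have hcont : ¬ (PySem.Set.contains (PySem.Set.ofList (win arr i j)) (arr.getD j 0) = true) := by
        intro h
        exact hmem ((PySem.Set.mem_ofList _ _).mp ((PySem.Set.contains_iff _ _).mp h))
      rw [if_neg hcont]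
      have hws : win arr i (j + 1) = win arr i j ++ [arr.getD j 0] := win_succ arr i j hij hj
      have hndw : (win arr i (j + 1)).Nodup := by
        rw [hws, List.nodup_append]
        refine ⟨hnd, List.nodup_singleton _, ?_⟩
        intro a ha b hb
        rw [List.mem_singleton] at hb
        subst hb
        exact fun he => hmem (he ▸ ha)
      have hseen : PySem.Set.add (PySem.Set.ofList (win arr i j)) (arr.getD j 0)
          = PySem.Set.ofList (win arr i (j + 1)) := by
        rw [hws, PySem.Set.ofList_append_singleton]
      have hmn : min ((win arr i j).foldl min (arr.getD i 0)) (arr.getD j 0)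
          = (win arr i (j + 1)).foldl min (arr.getD i 0) := by
        rw [hws, List.foldl_append]; rfl
      have hmx : max ((win arr i j).foldl max (arr.getD i 0)) (arr.getD j 0)
          = (win arr i (j + 1)).foldl max (arr.getD i 0) := by
        rw [hws, List.foldl_append]; rfl
      have hhead : win arr i (j + 1) = arr[i] :: (arr.drop (i + 1)).take (j - i) :=
        win_head arr i j hij hi
      have hlen : (win arr i (j + 1)).length = j - i + 1 := by
        rw [hhead]; simp; omega
      have hlenc : ((win arr i (j + 1)).length : Int) = (j : Int) - (i : Int) + 1 := by
        rw [hlen]; push_cast; omega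
      have hmax? : (PySem.List.max? (win arr i (j + 1)) (fun y => y)).getD 0
          = (win arr i (j + 1)).foldl max (arr.getD i 0) := by
        rw [hhead, PySem.List.max?_id_cons]
        simp [List.foldl_cons, List.getElem?_eq_getElem hi]
      have hmin? : (PySem.List.min? (win arr i (j + 1)) (fun y => y)).getD 0
          = (win arr i (j + 1)).foldl min (arr.getD i 0) := by
        rw [hhead, PySem.List.min?_id_cons]
        simp [List.foldl_cons, List.getElem?_eq_getElem hi]
      have hfirst : (PySem.Set.ofList (win arr i (j + 1))).length = (win arr i (j + 1)).length :=
        (ofList_length_eq_iff _).mpr hndw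
      -- the two updated accumulators agree
      have hacc :
          (if max ((win arr i j).foldl max (arr.getD i 0)) (arr.getD j 0)
                - min ((win arr i j).foldl min (arr.getD i 0)) (arr.getD j 0)
                = (j : Int) - (i : Int) then
             if (j : Int) - (i : Int) + 1 > acc.1 then ((j : Int) - (i : Int) + 1, (i : Int)) else acc
           else acc)
          = (if (PySem.Set.ofList (win arr i (j + 1))).length = (win arr i (j + 1)).length ∧
               (PySem.List.max? (win arr i (j + 1)) (fun y => y)).getD 0
                 - (PySem.List.min? (win arr i (j + 1)) (fun y => y)).getD 0
                 = ((win arr i (j + 1)).length : Int) - 1 ∧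
               ((win arr i (j + 1)).length : Int) > acc.1
             then (((win arr i (j + 1)).length : Int), (i : Int)) else acc) := by
        rw [hmax?, hmin?, hmn, hmx, hlenc]
        have harith : ((j : Int) - (i : Int) + 1) - 1 = (j : Int) - (i : Int) := by ring
        rw [harith]
        simp only [hfirst, true_and]
        rw [ite_and]
      rw [hacc, hseen, hmn, hmx]
      exact ih (j + 1) _ (by omega) (by omega) hndw

-- ===== VERDICT (by name: the statement is the Claim_ definition above) =====
theorem consecutive_subarray_spec : Claim_equal_consecutive_subarray := by
  intro arr _
  unfold Spec_consecutive_subarray consecutive_subarray consecutive_subarray_alt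
  have hstep : (fun (acc : Int × Int) (i : Nat) =>
      innerA arr arr.length i acc PySem.Set.empty (arr.getD i 0) (arr.getD i 0) i)
      = fun acc i => innerB arr arr.length i acc i := by
    funext acc i
    have h := inner_eq arr i (arr.length - i) i acc rfl le_rfl (by simp [win])
    simpa [win, PySem.Set.ofList_nil, PySem.Set.empty] using h
  simp only [hstep]
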